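-- pv_equiv track=rewrite | github.com/carlosal1015/Analysis-and-Numerical-Modeling-I | PD1/codigos.py | decimal_a_complementoa1
-- ===== SOURCE A (Python) =====
-- def decimal_a_binario(decimal):
--     binario = ""
--     if decimal == 0:
--         return 0
--     elif decimal < 0:
--         decimal = -decimal
--
--         while decimal > 0:
--             residuo = int(decimal % 2)
--             decimal = int(decimal / 2)
--             binario = str(residuo) + binario
--         return "-" + binario
--     else:
--         while decimal > 0:
--             residuo = int(decimal % 2)
--             decimal = int(decimal / 2)
--             binario = str(residuo) + binario
--         return binario
--
-- def decimal_a_complementoa1(decimal):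
--     if decimal < 0:
--         decimal = -decimal
--     elif decimal == 0:
--         return "00000000"
--     if decimal < 127:
--         n = 8  # numero de bits
--     else:
--         if decimal < 32768:
--             n = 16
--         else:
--             n = 32
--     # transformando de decimal a binario
--     c = decimal_a_binario(decimal)
--     m = len(c)
--     for i in range(n - int(m)):
--         c = "0" + c
--
--     # cambia los 1 por 0 y los 0 por 1
--     c = c.replace("1", "a")
--     c = c.replace("0", "1")
--     c = c.replace("a", "0")
--     return c
-- ===== SOURCE B (Python) =====
-- def decimal_a_complementoa1(decimal):
--     d = -decimal if decimal < 0 else decimal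
--     if d == 0:
--         return "00000000"
--     n = 8 if d < 127 else (16 if d < 32768 else 32)
--     return format((1 << n) - 1 - d, "0" + str(n) + "b")
-- ===== Notes on version B (the rewrite author's own statement) =====
-- stated objective: simpler
-- what changed: Replaces A's repeated-division binary loop, zero-padding loop and triple string-replace bit flip with the closed-form arithmetic one's complement of abs(decimal) at width n, rendered by a single format() call.
import Mathlib
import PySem

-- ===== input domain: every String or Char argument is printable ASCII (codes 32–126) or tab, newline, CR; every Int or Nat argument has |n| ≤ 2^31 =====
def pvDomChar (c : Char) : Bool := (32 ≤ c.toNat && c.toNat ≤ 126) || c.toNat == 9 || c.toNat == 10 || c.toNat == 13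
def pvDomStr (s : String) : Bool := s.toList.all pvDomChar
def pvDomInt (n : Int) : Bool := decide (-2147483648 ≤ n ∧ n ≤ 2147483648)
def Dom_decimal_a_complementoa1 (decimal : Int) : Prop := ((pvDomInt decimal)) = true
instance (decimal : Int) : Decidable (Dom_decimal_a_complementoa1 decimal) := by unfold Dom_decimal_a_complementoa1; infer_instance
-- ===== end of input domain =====

-- B replaces A's repeated-division binary loop, zero-padding loop and triple-replace bit
-- flip by the closed-form arithmetic one's complement at width n, rendered once with format().

-- ===== PORT A =====
-- While loop of decimal_a_binario (A only calls it with a strictly positive argument, so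
-- only its positive branch's loop is reachable from decimal_a_complementoa1).
-- Python computes int(decimal / 2) through float division; for 0 < decimal ≤ 2^31 the float
-- quotient is exact, so it equals floor division decimal // 2, ported as PySem.Int.floordiv.
def pvBinLoop (decimal : Int) (binario : String) : String :=
  if _h : decimal > 0 then
    pvBinLoop (PySem.Int.floordiv decimal 2)
      (PySem.Int.toStr (PySem.Int.mod decimal 2) ++ binario)
  else binario
termination_by decimal.toNat
decreasing_by
  rw [PySem.Int.floordiv_eq_ediv_of_pos (by norm_num : (0:Int) < 2)]
  omega

-- the body of decimal_a_complementoa1 after the sign/zero handling, on the (positive) value d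
def pvA_rest (d : Int) : String :=
  let n : Int := if d < 127 then 8 else if d < 32768 then 16 else 32
  let c := pvBinLoop d ""
  let m : Int := (PySem.Str.len c : Int)
  let c := (PySem.List.pyRange 0 (n - m) 1).foldl (fun c _ => "0" ++ c) c
  let c := PySem.Str.replace c "1" "a"
  let c := PySem.Str.replace c "0" "1"
  PySem.Str.replace c "a" "0"

def decimal_a_complementoa1 (decimal : Int) : String :=
  if decimal < 0 then pvA_rest (-decimal)
  else if decimal = 0 then "00000000"
  else pvA_rest decimal

-- ===== PORT B =====
-- binary digits of x, most significant first (empty for 0); helper for format(x, '0nb')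
def pvBinDigits : Nat → List Char
  | 0 => []
  | (x+1) =>
    pvBinDigits ((x+1) / 2) ++ [if (x+1) % 2 = 1 then '1' else '0']
decreasing_by omega

-- format(x, '0' + str(n) + 'b'): binary digits of x left-padded with '0' to width n (x > 0 here)
def pvFmtBin (x n : Nat) : String :=
  String.ofList (List.replicate (n - (pvBinDigits x).length) '0' ++ pvBinDigits x)

def decimal_a_complementoa1_alt (decimal : Int) : String :=
  let d : Int := if decimal < 0 then -decimal else decimal
  if d = 0 then "00000000"
  else
    let n : Nat := if d < 127 then 8 else if d < 32768 then 16 else 32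
    pvFmtBin (2 ^ n - 1 - d.toNat) n

-- ===== PRECONDITION & SPEC =====
def Spec_decimal_a_complementoa1 (decimal : Int) (out : String) : Prop := out = decimal_a_complementoa1_alt decimal
instance (decimal : Int) (out : String) : Decidable (Spec_decimal_a_complementoa1 decimal out) := by unfold Spec_decimal_a_complementoa1; infer_instance

-- ===== CLAIM (what is proved, stated in full; the proofs are below) =====
def Claim_equal_decimal_a_complementoa1 : Prop := ∀ (decimal : Int), Dom_decimal_a_complementoa1 decimal → Spec_decimal_a_complementoa1 decimal (decimal_a_complementoa1 decimal)

-- ===== LEMMAS AND PROOFS =====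

-- fixed-width bits of d, least significant first
def pvBitsN : Nat → Nat → List Bool
  | 0, _ => []
  | (n+1), d => (d % 2 == 1) :: pvBitsN n (d / 2)

def pvChr (b : Bool) : Char := if b then '1' else '0'
def pvFlip (c : Char) : Char := if c = '1' then '0' else '1'

lemma pvBitsN_zero (n : Nat) : pvBitsN n 0 = List.replicate n false := by
  induction n with
  | zero => rfl
  | succ n ih => simp [pvBitsN, ih, List.replicate_succ]

-- one's complement is bitwise negation at fixed width
lemma pvBitsN_compl (n : Nat) : ∀ d, d < 2 ^ n →
    pvBitsN n (2 ^ n - 1 - d) = (pvBitsN n d).map not := by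
  induction n with
  | zero => intro d hd; simp [pvBitsN]
  | succ n ih =>
    intro d hd
    have h2 : 2 ^ (n+1) = 2 * 2 ^ n := by ring
    have hd2 : d / 2 < 2 ^ n := by omega
    have hmod : d % 2 = 0 ∨ d % 2 = 1 := by omega
    have key : (2 ^ (n+1) - 1 - d) / 2 = 2 ^ n - 1 - d / 2 := by omega
    have kmod : (2 ^ (n+1) - 1 - d) % 2 = 1 - d % 2 := by omega
    simp only [pvBitsN, List.map_cons, key, kmod, ih _ hd2]
    rcases hmod with h | h <;> simp [h]

lemma pvBinDigits_len_le (k : Nat) : ∀ d, d < 2 ^ k → (pvBinDigits d).length ≤ k := by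
  induction k with
  | zero => intro d hd; interval_cases d; simp [pvBinDigits]
  | succ k ih =>
    intro d hd
    match d with
    | 0 => simp [pvBinDigits]
    | (x+1) =>
      rw [pvBinDigits]
      have : (x+1)/2 < 2 ^ k := by
        have : 2 ^ (k+1) = 2 * 2 ^ k := by ring
        omega
      have := ih _ this
      simp; omega

-- rendering: the reversed fixed-width bit list is the zero-padded digit string
lemma pvBitsN_render (n : Nat) : ∀ d, d < 2 ^ n →
    (pvBitsN n d).reverse.map pvChr
      = List.replicate (n - (pvBinDigits d).length) '0' ++ pvBinDigits d := by
  induction n with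
  | zero => intro d hd; interval_cases d; simp [pvBitsN, pvBinDigits]
  | succ n ih =>
    intro d hd
    match d with
    | 0 =>
      simp [pvBitsN_zero, pvBinDigits, List.map_replicate, pvChr]
    | (x+1) =>
      have h2 : 2 ^ (n+1) = 2 * 2 ^ n := by ring
      have hd2 : (x+1) / 2 < 2 ^ n := by omega
      have hlen := pvBinDigits_len_le n _ hd2
      rw [pvBinDigits]
      simp only [pvBitsN, List.reverse_cons, List.map_append, List.map_cons, List.map_nil,
        ih _ hd2, List.length_append, List.length_singleton]
      have hrep : n + 1 - ((pvBinDigits ((x+1)/2)).length + 1) = n - (pvBinDigits ((x+1)/2)).length := by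
        omega
      rw [hrep, List.append_assoc]
      congr 2
      have : (x+1) % 2 = 0 ∨ (x+1) % 2 = 1 := by omega
      rcases this with h | h <;> simp [pvChr, h]

lemma pvBinDigits_mem (d : Nat) : ∀ c ∈ pvBinDigits d, c = '0' ∨ c = '1' := by
  induction d using Nat.strong_induction_on with
  | _ d ih =>
    match d with
    | 0 => simp [pvBinDigits]
    | (x+1) =>
      rw [pvBinDigits]
      intro c hc
      rcases List.mem_append.mp hc with h | h
      · exact ih _ (by omega) c h
      · simp at h; subst h; split <;> simp

-- A's while loop produces the binary digit string
lemma pvBinLoop_eq (d : Nat) : ∀ acc : String,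
    (pvBinLoop (d : Int) acc).toList = pvBinDigits d ++ acc.toList := by
  induction d using Nat.strong_induction_on with
  | _ d ih =>
    intro acc
    match d with
    | 0 => rw [pvBinLoop]; simp [pvBinDigits]
    | (x+1) =>
      rw [pvBinLoop]
      have hpos : ((x+1 : Nat) : Int) > 0 := by positivity
      rw [dif_pos hpos]
      have hfd : PySem.Int.floordiv ((x+1 : Nat) : Int) 2 = (((x+1) / 2 : Nat) : Int) := by
        exact_mod_cast PySem.Int.floordiv_natCast (x+1) 2
      have hmd : PySem.Int.mod ((x+1 : Nat) : Int) 2 = (((x+1) % 2 : Nat) : Int) := by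
        exact_mod_cast PySem.Int.mod_natCast (x+1) 2
      rw [hfd, hmd, ih ((x+1)/2) (by omega)]
      rw [pvBinDigits]
      have : (x+1) % 2 = 0 ∨ (x+1) % 2 = 1 := by omega
      rcases this with h | h <;>
        simp [h, PySem.Int.toStr, List.append_assoc,
          show PySem.Int.toChars 0 = ['0'] from by decide,
          show PySem.Int.toChars 1 = ['1'] from by decide]

-- the padding for-loop prepends (n-m).toNat zeros
lemma pvPad_foldl (l : List Int) : ∀ c : String,
    ((l.foldl (fun c _ => "0" ++ c) c)).toList
      = List.replicate l.length '0' ++ c.toList := by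
  induction l with
  | nil => intro c; simp
  | cons a t ih =>
    intro c
    simp only [List.foldl_cons, ih, List.length_cons]
    have h1 : ("0" ++ c).toList = '0' :: c.toList := by simp
    rw [h1, ← List.singleton_append, ← List.append_assoc, ← List.replicate_succ',
      List.replicate_succ, List.cons_append]

-- single-character replace is a map
lemma pvReplace_go_single (a b : Char) : ∀ (fuel : Nat) (l acc : List Char),
    l.length ≤ fuel →
    PySem.Chars.replace.go [a] [b] fuel l acc
      = acc.reverse ++ l.map (fun c => if c = a then b else c) := by
  intro fuel
  induction fuel with
  | zero =>
    intro l acc h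
    match l with
    | [] => simp [PySem.Chars.replace.go]
  | succ fuel ih =>
    intro l acc h
    match l with
    | [] => simp [PySem.Chars.replace.go]
    | c :: t =>
      rw [PySem.Chars.replace.go]
      by_cases hc : c = a
      · have hpre : List.isPrefixOf [a] (c :: t) = true := by
          simp [List.isPrefixOf, hc]
        rw [if_pos hpre]
        simp only [List.length_cons] at h
        simp only [List.length_singleton, List.drop_succ_cons, List.drop_zero,
          List.reverse_singleton, List.singleton_append]
        rw [ih t (b :: acc) (by omega)]
        simp [hc]
      · have hpre : List.isPrefixOf [a] (c :: t) = false := by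
          simp [List.isPrefixOf]; exact fun h' => absurd h'.symm hc
        rw [if_neg (by simp [hpre])]
        simp only [List.length_cons] at h
        rw [ih t _ (by omega)]
        simp [hc]

lemma pvReplace_single (a b : Char) (l : List Char) :
    PySem.Chars.replace l [a] [b] = l.map (fun c => if c = a then b else c) := by
  rw [PySem.Chars.replace]
  simp only [List.isEmpty_cons, if_false, Bool.false_eq_true]
  rw [pvReplace_go_single a b l.length l [] le_rfl]
  simp

-- the triple replace flips every bit of a 0/1 string
lemma pvReplace_chain (l : List Char) (h : ∀ c ∈ l, c = '0' ∨ c = '1') :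
    PySem.Chars.replace
      (PySem.Chars.replace (PySem.Chars.replace l ['1'] ['a']) ['0'] ['1'])
      ['a'] ['0'] = l.map pvFlip := by
  rw [pvReplace_single, pvReplace_single, pvReplace_single]
  rw [List.map_map, List.map_map]
  apply List.map_congr_left
  intro c hc
  rcases h c hc with h0 | h0 <;> simp [h0, pvFlip, Function.comp]

lemma pvFlip_chr (b : Bool) : pvFlip (pvChr b) = pvChr (!b) := by
  cases b <;> simp [pvFlip, pvChr]

-- the core: for 0 < d < 2^n, A's rest equals B's formatted complement
lemma pvRest_eq (n : Nat) (d : Nat) (hn : n = 8 ∨ n = 16 ∨ n = 32)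
    (hd0 : 0 < d) (hdn : d < 2 ^ n)
    (h8 : ((d : Int) < 127 ↔ n = 8)) (h16 : ((d : Int) < 32768 ↔ n ≤ 16)) :
    pvA_rest (d : Int) = pvFmtBin (2 ^ n - 1 - d) n := by
  have hnInt : (if (d : Int) < 127 then (8:Int) else if (d : Int) < 32768 then 16 else 32) = (n : Int) := by
    rcases hn with h | h | h <;> subst h
    · rw [if_pos (h8.mpr rfl)]; norm_num
    · have h1 : ¬ (d:Int) < 127 := fun hh => absurd (h8.mp hh) (by norm_num)
      rw [if_neg h1, if_pos (h16.mpr (by norm_num))]; norm_num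
    · have h1 : ¬ (d:Int) < 127 := fun hh => absurd (h8.mp hh) (by norm_num)
      have h2 : ¬ (d:Int) < 32768 := fun hh => absurd (h16.mp hh) (by norm_num)
      rw [if_neg h1, if_neg h2]; norm_num
  unfold pvA_rest
  rw [hnInt]
  have hloop : (pvBinLoop (d : Int) "").toList = pvBinDigits d := by
    simpa using pvBinLoop_eq d ""
  have hlen : (PySem.Str.len (pvBinLoop (d : Int) "") : Int) = ((pvBinDigits d).length : Int) := by
    simp [PySem.Str.len_eq, hloop]
  have hmle := pvBinDigits_len_le n d hdn
  -- the padded digit string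
  have hpadlen : ((n : Int) - ((pvBinDigits d).length : Int) ) = ((n - (pvBinDigits d).length : Nat) : Int) := by
    omega
  have hfold : ((PySem.List.pyRange 0 ((n : Int) - ((pvBinDigits d).length : Int)) 1).foldl
      (fun c _ => "0" ++ c) (pvBinLoop (d : Int) "")).toList
      = List.replicate (n - (pvBinDigits d).length) '0' ++ pvBinDigits d := by
    have hlr : (PySem.List.pyRange 0 ((n : Int) - ((pvBinDigits d).length : Int)) 1).length
        = n - (pvBinDigits d).length := by
      rw [PySem.List.length_pyRange_one]; omega
    rw [pvPad_foldl, hloop, hlr]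
  set padded : List Char := List.replicate (n - (pvBinDigits d).length) '0' ++ pvBinDigits d with hpaddef
  have hmem : ∀ c ∈ padded, c = '0' ∨ c = '1' := by
    intro c hc
    rcases List.mem_append.mp hc with h | h
    · left; exact (List.eq_of_mem_replicate h)
    · exact pvBinDigits_mem d c h
  -- both sides as lists
  apply String.toList_inj.mp
  simp only [PySem.Str.toList_replace, hlen]
  rw [hfold]
  have hchain := pvReplace_chain padded hmem
  simp only [hpaddef] at hchain ⊢
  simp only [show ("1" : String).toList = ['1'] from rfl,
    show ("0" : String).toList = ['0'] from rfl,
    show ("a" : String).toList = ['a'] from rfl]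
  rw [hchain]
  -- now: map pvFlip padded = pvFmtBin (2^n-1-d) n  .toList
  have hrender := pvBitsN_render n d hdn
  have hrender' := pvBitsN_render n (2 ^ n - 1 - d) (by omega)
  rw [← hrender, List.map_map,
    show pvFlip ∘ pvChr = pvChr ∘ (fun b => !b) from funext pvFlip_chr,
    ← List.map_map, List.map_reverse, ← pvBitsN_compl n d hdn, hrender']
  simp [pvFmtBin]

-- ===== VERDICT (by name: the statement is the Claim_ definition above) =====
theorem decimal_a_complementoa1_spec : Claim_equal_decimal_a_complementoa1 := by
  intro decimal hdom
  unfold Spec_decimal_a_complementoa1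
  unfold Dom_decimal_a_complementoa1 pvDomInt at hdom
  have hbound : -2147483648 ≤ decimal ∧ decimal ≤ 2147483648 := by
    simpa using hdom
  unfold decimal_a_complementoa1 decimal_a_complementoa1_alt
  by_cases hneg : decimal < 0
  · rw [if_pos hneg]
    have hd0 : ¬ (-decimal = 0) := by omega
    simp only [if_pos hneg, if_neg hd0]
    set d : Int := -decimal with hddef
    have hdpos : 0 < d := by omega
    have hdle : d ≤ 2147483648 := by omega
    have hnat : d = ((d.toNat : Nat) : Int) := by omega
    rw [hnat]
    set dn := d.toNat with hdn
    by_cases h127 : (dn : Int) < 127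
    · rw [pvRest_eq 8 dn (by omega) (by omega) (by omega) (by omega) (by constructor <;> intro <;> omega)]
      simp [h127]
    · by_cases h32768 : (dn : Int) < 32768
      · rw [pvRest_eq 16 dn (by omega) (by omega) (by omega) (by omega) (by constructor <;> intro <;> omega)]
        simp [h127, h32768]
      · rw [pvRest_eq 32 dn (by omega) (by omega) (by omega) (by omega) (by constructor <;> intro <;> omega)]
        simp [h127, h32768]
  · rw [if_neg hneg]
    by_cases hz : decimal = 0
    · simp [hz]
    · rw [if_neg hz]
      simp only [if_neg hneg, if_neg hz]
      have hnat : decimal = ((decimal.toNat : Nat) : Int) := by omega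
      rw [hnat]
      set dn := decimal.toNat with hdn
      by_cases h127 : (dn : Int) < 127
      · rw [pvRest_eq 8 dn (by omega) (by omega) (by omega) (by omega) (by constructor <;> intro <;> omega)]
        simp [h127]
      · by_cases h32768 : (dn : Int) < 32768
        · rw [pvRest_eq 16 dn (by omega) (by omega) (by omega) (by omega) (by constructor <;> intro <;> omega)]
          simp [h127, h32768]
        · rw [pvRest_eq 32 dn (by omega) (by omega) (by omega) (by omega) (by constructor <;> intro <;> omega)]
          simp [h127, h32768]
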